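-- pv_equiv track=rewrite | github.com/VedantNDasgupta/Football-Scout-Vedant | fifa_dashboard_vedant.py | assign_position_group
-- ===== SOURCE A (Python) =====
-- def assign_position_group(pos):
--     if 'GK' in pos:
--         return 'Goalkeeper'
--     elif any(p in pos for p in ['CB', 'LB', 'RB', 'LWB', 'RWB']):
--         return 'Defender'
--     elif any(p in pos for p in ['CM', 'CDM', 'CAM', 'RM', 'LM', 'LW', 'RW']):
--         return 'Midfielder'
--     elif any(p in pos for p in ['ST', 'CF', 'LF', 'RF']):
--         return 'Forward'
--     else:
--         return 'Other'
-- ===== SOURCE B (Python) =====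
-- # Single left-to-right scan of pos: at each index, record the best (lowest)
-- # priority of any position code that starts there; map the best priority to its group.
-- CODE_PRIORITY = {
--     'GK': 0,
--     'CB': 1, 'LB': 1, 'RB': 1, 'LWB': 1, 'RWB': 1,
--     'CM': 2, 'CDM': 2, 'CAM': 2, 'RM': 2, 'LM': 2, 'LW': 2, 'RW': 2,
--     'ST': 3, 'CF': 3, 'LF': 3, 'RF': 3,
-- }
-- GROUPS = ['Goalkeeper', 'Defender', 'Midfielder', 'Forward', 'Other']
--
-- def assign_position_group(pos):
--     best = 4
--     for i in range(len(pos)):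
--         for code, pr in CODE_PRIORITY.items():
--             if pr < best and pos.startswith(code, i):
--                 best = pr
--     return GROUPS[best]
-- ===== Notes on version B (the rewrite author's own statement) =====
-- stated objective: alternative
-- what changed: Instead of four sequential per-group substring scans, B makes one left-to-right scan over the indices of pos, keeping the minimum priority of any position code that starts at each index (a code->priority dict), and maps the final minimum to its group.
import Mathlib
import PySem

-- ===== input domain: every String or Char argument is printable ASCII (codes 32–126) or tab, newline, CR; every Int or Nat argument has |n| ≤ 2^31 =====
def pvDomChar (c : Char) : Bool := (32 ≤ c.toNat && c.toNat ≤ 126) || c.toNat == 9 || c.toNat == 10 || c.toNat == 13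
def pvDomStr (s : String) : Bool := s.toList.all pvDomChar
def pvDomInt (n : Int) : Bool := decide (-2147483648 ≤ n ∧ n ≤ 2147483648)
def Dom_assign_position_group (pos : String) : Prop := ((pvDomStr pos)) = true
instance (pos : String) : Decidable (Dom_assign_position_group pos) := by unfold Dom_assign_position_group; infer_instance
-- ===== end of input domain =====

-- B replaces A's four per-group substring scans by ONE left-to-right scan of pos that keeps
-- the minimum priority of any position code starting at each index (alternative; same cost).

-- ===== PORT A =====
def assign_position_group (pos : String) : String :=
  if PySem.Str.isIn "GK" pos then "Goalkeeper"
  else if (["CB", "LB", "RB", "LWB", "RWB"]).any (fun p => PySem.Str.isIn p pos) then "Defender"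
  else if (["CM", "CDM", "CAM", "RM", "LM", "LW", "RW"]).any (fun p => PySem.Str.isIn p pos) then "Midfielder"
  else if (["ST", "CF", "LF", "RF"]).any (fun p => PySem.Str.isIn p pos) then "Forward"
  else "Other"

-- ===== PORT B =====
-- CODE_PRIORITY dict in insertion order (B only iterates its items)
def codePriority : List (String × Nat) :=
  [("GK", 0),
   ("CB", 1), ("LB", 1), ("RB", 1), ("LWB", 1), ("RWB", 1),
   ("CM", 2), ("CDM", 2), ("CAM", 2), ("RM", 2), ("LM", 2), ("LW", 2), ("RW", 2),
   ("ST", 3), ("CF", 3), ("LF", 3), ("RF", 3)]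

def groupsList : List String := ["Goalkeeper", "Defender", "Midfielder", "Forward", "Other"]

-- pos.startswith(code, i) with 0 ≤ i is exactly: code.toList is a prefix of pos.toList.drop i
def assign_position_group_alt (pos : String) : String :=
  let s := pos.toList
  let best := (List.range s.length).foldl
    (fun b i => codePriority.foldl
      (fun b cp => if cp.2 < b && List.isPrefixOf cp.1.toList (s.drop i) then cp.2 else b) b) 4
  groupsList.getD best "Other"

-- ===== PRECONDITION & SPEC =====
def Spec_assign_position_group (pos : String) (out : String) : Prop := out = assign_position_group_alt pos
instance (pos : String) (out : String) : Decidable (Spec_assign_position_group pos out) := by unfold Spec_assign_position_group; infer_instance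

-- ===== CLAIM (what is proved, stated in full; the proofs are below) =====
def Claim_equal_assign_position_group : Prop := ∀ (pos : String), Dom_assign_position_group pos → Spec_assign_position_group pos (assign_position_group pos)

-- ===== LEMMAS AND PROOFS =====

-- the inner update fold is a fold of `min` over the priorities of the codes matching at that index
lemma foldl_upd {α : Type} (f : α → Nat) (P : α → Bool) :
    ∀ (l : List α) (b0 : Nat),
      l.foldl (fun b x => if f x < b && P x then f x else b) b0
        = ((l.filter P).map f).foldl min b0 := by
  intro l
  induction l with
  | nil => intro b0; rfl
  | cons a l ih =>
    intro b0
    by_cases hP : P a = true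
    · have hmin : (if (decide (f a < b0) && P a) = true then f a else b0) = min b0 (f a) := by
        rw [hP, Bool.and_true]
        by_cases h : f a < b0 <;> simp [h, Nat.min_def]
      simp only [List.foldl_cons]
      rw [hmin, ih, List.filter_cons_of_pos hP, List.map_cons, List.foldl_cons]
    · simp only [List.foldl_cons]
      rw [if_neg (by simp [hP]), ih, List.filter_cons_of_neg (by simp [hP])]

lemma le_foldl_min : ∀ (l : List Nat) (b0 k : Nat),
    k ≤ l.foldl min b0 ↔ k ≤ b0 ∧ ∀ v ∈ l, k ≤ v := by
  intro l
  induction l with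
  | nil => simp
  | cons a l ih =>
    intro b0 k
    simp only [List.foldl_cons, ih, List.mem_cons]
    constructor
    · rintro ⟨h1, h2⟩
      exact ⟨by omega, fun v hv => hv.elim (fun h => by omega) (h2 v)⟩
    · rintro ⟨h1, h2⟩
      exact ⟨by have := h2 a (Or.inl rfl); omega, fun v hv => h2 v (Or.inr hv)⟩

lemma foldl_min_le_init : ∀ (l : List Nat) (b0 : Nat), l.foldl min b0 ≤ b0 := by
  intro l
  induction l with
  | nil => simp
  | cons a l ih => intro b0; exact le_trans (ih _) (by omega)

lemma foldl_min_le_mem : ∀ (l : List Nat) (b0 v : Nat), v ∈ l → l.foldl min b0 ≤ v := by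
  intro l
  induction l with
  | nil => simp
  | cons a l ih =>
    intro b0 v hv
    rcases List.mem_cons.mp hv with rfl | hv
    · exact le_trans (foldl_min_le_init l (min b0 v)) (by omega)
    · exact ih _ _ hv

-- the multiset of priorities found anywhere in s
def allVals (s : List Char) : List Nat :=
  (List.range s.length).flatMap
    (fun i => ((codePriority.filter (fun cp => List.isPrefixOf cp.1.toList (s.drop i))).map (fun cp => cp.2)))

lemma best_eq_aux (s : List Char) (cps : List (String × Nat)) :
    ∀ (l : List Nat) (b : Nat),
      l.foldl
        (fun b i => cps.foldl
          (fun b cp => if cp.2 < b && List.isPrefixOf cp.1.toList (s.drop i) then cp.2 else b) b) b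
      = (l.flatMap
          (fun i => ((cps.filter (fun cp => List.isPrefixOf cp.1.toList (s.drop i))).map
            (fun cp => cp.2)))).foldl min b := by
  intro l
  induction l with
  | nil => intro b; rfl
  | cons i l ih =>
    intro b
    simp only [List.foldl_cons, List.flatMap_cons, List.foldl_append]
    rw [foldl_upd (fun cp : String × Nat => cp.2) (fun cp : String × Nat => List.isPrefixOf cp.1.toList (s.drop i)) cps b]
    exact ih _

lemma best_eq (s : List Char) :
    (List.range s.length).foldl
      (fun b i => codePriority.foldl
        (fun b cp => if cp.2 < b && List.isPrefixOf cp.1.toList (s.drop i) then cp.2 else b) b) 4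
    = (allVals s).foldl min 4 := best_eq_aux s codePriority (List.range s.length) 4

-- some code with priority k occurs somewhere in s
def prMatched (s : List Char) (k : Nat) : Prop :=
  ∃ cp ∈ codePriority, cp.2 = k ∧ PySem.Chars.isIn cp.1.toList s = true

lemma mem_allVals_iff (s : List Char) (v : Nat) :
    v ∈ allVals s ↔ prMatched s v := by
  unfold allVals prMatched
  simp only [List.mem_flatMap, List.mem_range, List.mem_map, List.mem_filter]
  constructor
  · rintro ⟨i, hi, cp, ⟨hcp, hpre⟩, hv⟩
    refine ⟨cp, hcp, hv, ?_⟩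
    exact (PySem.Chars.exists_prefix_drop_iff_isIn _ _).mp ⟨i, List.isPrefixOf_iff_prefix.mp hpre⟩
  · rintro ⟨cp, hcp, hv, hin⟩
    obtain ⟨j, hj⟩ := (PySem.Chars.exists_prefix_drop_iff_isIn _ _).mpr hin
    have hne : cp.1.toList ≠ [] := by
      revert hcp; unfold codePriority; intro hcp
      fin_cases hcp <;> decide
    have hjlt : j < s.length := by
      by_contra h
      rw [List.drop_eq_nil_of_le (by omega)] at hj
      exact hne (List.prefix_nil.mp hj)
    exact ⟨j, hjlt, cp, ⟨hcp, List.isPrefixOf_iff_prefix.mpr hj⟩, hv⟩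

lemma pm0_iff (s : List Char) :
    prMatched s 0 ↔ PySem.Chars.isIn "GK".toList s = true := by
  constructor
  · rintro ⟨cp, hcp, hk, hin⟩
    revert hcp; unfold codePriority; intro hcp
    fin_cases hcp <;> simp_all
  · intro h; exact ⟨("GK", 0), by unfold codePriority; simp, rfl, h⟩

lemma pm1_iff (s : List Char) :
    prMatched s 1 ↔
      (PySem.Chars.isIn "CB".toList s = true ∨ PySem.Chars.isIn "LB".toList s = true ∨
       PySem.Chars.isIn "RB".toList s = true ∨ PySem.Chars.isIn "LWB".toList s = true ∨
       PySem.Chars.isIn "RWB".toList s = true) := by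
  constructor
  · rintro ⟨cp, hcp, hk, hin⟩
    revert hcp; unfold codePriority; intro hcp
    fin_cases hcp <;> simp_all
  · rintro (h | h | h | h | h)
    · exact ⟨("CB", 1), by unfold codePriority; simp, rfl, h⟩
    · exact ⟨("LB", 1), by unfold codePriority; simp, rfl, h⟩
    · exact ⟨("RB", 1), by unfold codePriority; simp, rfl, h⟩
    · exact ⟨("LWB", 1), by unfold codePriority; simp, rfl, h⟩
    · exact ⟨("RWB", 1), by unfold codePriority; simp, rfl, h⟩

lemma pm2_iff (s : List Char) :
    prMatched s 2 ↔
      (PySem.Chars.isIn "CM".toList s = true ∨ PySem.Chars.isIn "CDM".toList s = true ∨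
       PySem.Chars.isIn "CAM".toList s = true ∨ PySem.Chars.isIn "RM".toList s = true ∨
       PySem.Chars.isIn "LM".toList s = true ∨ PySem.Chars.isIn "LW".toList s = true ∨
       PySem.Chars.isIn "RW".toList s = true) := by
  constructor
  · rintro ⟨cp, hcp, hk, hin⟩
    revert hcp; unfold codePriority; intro hcp
    fin_cases hcp <;> simp_all
  · rintro (h | h | h | h | h | h | h)
    · exact ⟨("CM", 2), by unfold codePriority; simp, rfl, h⟩
    · exact ⟨("CDM", 2), by unfold codePriority; simp, rfl, h⟩
    · exact ⟨("CAM", 2), by unfold codePriority; simp, rfl, h⟩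
    · exact ⟨("RM", 2), by unfold codePriority; simp, rfl, h⟩
    · exact ⟨("LM", 2), by unfold codePriority; simp, rfl, h⟩
    · exact ⟨("LW", 2), by unfold codePriority; simp, rfl, h⟩
    · exact ⟨("RW", 2), by unfold codePriority; simp, rfl, h⟩

lemma pm3_iff (s : List Char) :
    prMatched s 3 ↔
      (PySem.Chars.isIn "ST".toList s = true ∨ PySem.Chars.isIn "CF".toList s = true ∨
       PySem.Chars.isIn "LF".toList s = true ∨ PySem.Chars.isIn "RF".toList s = true) := by
  constructor
  · rintro ⟨cp, hcp, hk, hin⟩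
    revert hcp; unfold codePriority; intro hcp
    fin_cases hcp <;> simp_all
  · rintro (h | h | h | h)
    · exact ⟨("ST", 3), by unfold codePriority; simp, rfl, h⟩
    · exact ⟨("CF", 3), by unfold codePriority; simp, rfl, h⟩
    · exact ⟨("LF", 3), by unfold codePriority; simp, rfl, h⟩
    · exact ⟨("RF", 3), by unfold codePriority; simp, rfl, h⟩

lemma vals_le_three (s : List Char) : ∀ v ∈ allVals s, v ≤ 3 := by
  intro v hv
  obtain ⟨cp, hcp, hk, -⟩ := (mem_allVals_iff s v).mp hv
  revert hcp; unfold codePriority; intro hcp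
  fin_cases hcp <;> omega

-- ===== VERDICT (by name: the statement is the Claim_ definition above) =====
theorem assign_position_group_spec : Claim_equal_assign_position_group := by
  intro pos _
  unfold Spec_assign_position_group assign_position_group assign_position_group_alt
  simp only [best_eq]
  set s := pos.toList with hs
  have hstr : ∀ p : String, PySem.Str.isIn p pos = PySem.Chars.isIn p.toList s := by
    intro p; rfl
  by_cases h0 : prMatched s 0
  · have hle : (allVals s).foldl min 4 ≤ 0 := foldl_min_le_mem _ _ _ ((mem_allVals_iff s 0).mpr h0)
    have hb : (allVals s).foldl min 4 = 0 := by omega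
    rw [hstr, if_pos ((pm0_iff s).mp h0), hb]
    rfl
  · have hGK : PySem.Chars.isIn "GK".toList s ≠ true := fun h => h0 ((pm0_iff s).mpr h)
    rw [hstr, if_neg hGK]
    have hv0 : ∀ v ∈ allVals s, v ≠ 0 := fun v hv he =>
      h0 (he ▸ (mem_allVals_iff s v).mp hv)
    by_cases h1 : prMatched s 1
    · have hle : (allVals s).foldl min 4 ≤ 1 := foldl_min_le_mem _ _ _ ((mem_allVals_iff s 1).mpr h1)
      have hge : 1 ≤ (allVals s).foldl min 4 :=
        (le_foldl_min _ _ _).mpr ⟨by omega, fun v hv => by have := hv0 v hv; omega⟩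
      have hb : (allVals s).foldl min 4 = 1 := by omega
      have hany : (["CB", "LB", "RB", "LWB", "RWB"]).any (fun p => PySem.Str.isIn p pos) = true := by
        simp only [List.any, hstr, Bool.or_eq_true, Bool.false_eq_true, or_false]
        exact (pm1_iff s).mp h1
      rw [if_pos hany, hb]; rfl
    · have hv1 : ∀ v ∈ allVals s, v ≠ 1 := fun v hv he =>
        h1 (he ▸ (mem_allVals_iff s v).mp hv)
      have hanyD : (["CB", "LB", "RB", "LWB", "RWB"]).any (fun p => PySem.Str.isIn p pos) ≠ true := by
        simp only [List.any, hstr]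
        intro h
        simp only [Bool.or_eq_true, Bool.false_eq_true, or_false] at h
        exact h1 ((pm1_iff s).mpr h)
      rw [if_neg hanyD]
      by_cases h2 : prMatched s 2
      · have hle : (allVals s).foldl min 4 ≤ 2 := foldl_min_le_mem _ _ _ ((mem_allVals_iff s 2).mpr h2)
        have hge : 2 ≤ (allVals s).foldl min 4 :=
          (le_foldl_min _ _ _).mpr ⟨by omega, fun v hv => by
            have := hv0 v hv; have := hv1 v hv; omega⟩
        have hb : (allVals s).foldl min 4 = 2 := by omega
        have hany : (["CM", "CDM", "CAM", "RM", "LM", "LW", "RW"]).any (fun p => PySem.Str.isIn p pos) = true := by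
          simp only [List.any, hstr, Bool.or_eq_true, Bool.false_eq_true, or_false]
          exact (pm2_iff s).mp h2
        rw [if_pos hany, hb]; rfl
      · have hv2 : ∀ v ∈ allVals s, v ≠ 2 := fun v hv he =>
          h2 (he ▸ (mem_allVals_iff s v).mp hv)
        have hanyM : (["CM", "CDM", "CAM", "RM", "LM", "LW", "RW"]).any (fun p => PySem.Str.isIn p pos) ≠ true := by
          simp only [List.any, hstr]
          intro h
          simp only [Bool.or_eq_true, Bool.false_eq_true, or_false] at h
          exact h2 ((pm2_iff s).mpr h)
        rw [if_neg hanyM]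
        by_cases h3 : prMatched s 3
        · have hle : (allVals s).foldl min 4 ≤ 3 := foldl_min_le_mem _ _ _ ((mem_allVals_iff s 3).mpr h3)
          have hge : 3 ≤ (allVals s).foldl min 4 :=
            (le_foldl_min _ _ _).mpr ⟨by omega, fun v hv => by
              have := hv0 v hv; have := hv1 v hv; have := hv2 v hv; omega⟩
          have hb : (allVals s).foldl min 4 = 3 := by omega
          have hany : (["ST", "CF", "LF", "RF"]).any (fun p => PySem.Str.isIn p pos) = true := by
            simp only [List.any, hstr, Bool.or_eq_true, Bool.false_eq_true, or_false]
            exact (pm3_iff s).mp h3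
          rw [if_pos hany, hb]; rfl
        · have hv3 : ∀ v ∈ allVals s, v ≠ 3 := fun v hv he =>
            h3 (he ▸ (mem_allVals_iff s v).mp hv)
          have hanyF : (["ST", "CF", "LF", "RF"]).any (fun p => PySem.Str.isIn p pos) ≠ true := by
            simp only [List.any, hstr]
            intro h
            simp only [Bool.or_eq_true, Bool.false_eq_true, or_false] at h
            exact h3 ((pm3_iff s).mpr h)
          rw [if_neg hanyF]
          have hge : 4 ≤ (allVals s).foldl min 4 :=
            (le_foldl_min _ _ _).mpr ⟨le_rfl, fun v hv => by
              have := vals_le_three s v hv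
              have := hv0 v hv; have := hv1 v hv; have := hv2 v hv; have := hv3 v hv; omega⟩
          have hle : (allVals s).foldl min 4 ≤ 4 := foldl_min_le_init _ _
          have hb : (allVals s).foldl min 4 = 4 := by omega
          rw [hb]; rfl
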